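-- pv_equiv track=rewrite | github.com/DaphneZadoraUCLL/coursematerial_2425 | 05-strings/17-assignment-is-student-id/student.py | is_student_id
-- ===== SOURCE A (Python) =====
-- def is_digit(char):
--     return '0' <= char <= '9'
--
-- def is_student_id(string):
--     if len(string) != 8:
--         return False
--     first_char = (string[0])
--     if first_char.lower() not in ['r', 's']:
--         return False
--     for char in string[1:]:
--         if not is_digit(char):
--             return False
--
--     return True
-- ===== SOURCE B (Python) =====
-- def is_student_id(string):
--     # One left-to-right DFA pass: state 0 = expecting the prefix letter,
--     # states 1..8 = seen letter plus (state-1) digits, -1 = dead state.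
--     # Accept iff the run ends in state 8 (letter + exactly 7 digits).
--     state = 0
--     for ch in string:
--         if state == 0:
--             state = 1 if ch in 'rRsS' else -1
--         elif 1 <= state <= 7 and '0' <= ch <= '9':
--             state += 1
--         else:
--             state = -1
--     return state == 8
-- ===== Notes on version B (the rewrite author's own statement) =====
-- stated objective: alternative
-- what changed: Replaces A's staged checks (length test, first-char lower()+list membership, digit loop over the tail slice) by a single left-to-right DFA pass: a fold over the characters maintaining an integer state (0 start, 1..8 progress, -1 dead) that accepts iff the final state is 8.
import Mathlib
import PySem

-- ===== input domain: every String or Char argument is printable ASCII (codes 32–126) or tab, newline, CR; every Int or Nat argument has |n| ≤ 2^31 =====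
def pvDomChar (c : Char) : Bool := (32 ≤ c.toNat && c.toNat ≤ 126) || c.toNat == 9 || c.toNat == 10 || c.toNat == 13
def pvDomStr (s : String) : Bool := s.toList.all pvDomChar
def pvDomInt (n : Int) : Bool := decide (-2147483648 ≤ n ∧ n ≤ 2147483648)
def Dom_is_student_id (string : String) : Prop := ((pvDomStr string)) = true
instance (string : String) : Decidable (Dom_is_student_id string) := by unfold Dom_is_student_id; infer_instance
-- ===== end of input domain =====

-- B replaces A's staged checks (length, first-char class, digit loop over a slice)
-- by one DFA pass: a fold with an integer state, accepting iff the final state is 8.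

-- ===== PORT A =====
def pvIsDigitA (char : Char) : Bool := decide ('0' ≤ char) && decide (char ≤ '9')

-- the 'for char in string[1:]' loop with its early return
def pvLoopA : List Char → Bool
  | [] => true
  | c :: rest => if !(pvIsDigitA c) then false else pvLoopA rest

def is_student_id (string : String) : Bool :=
  if PySem.Str.len string ≠ 8 then false
  else
    match PySem.Str.pyGet? string 0 with
    | none => false  -- unreachable: len(string) = 8
    | some first_char =>
      if !(decide (PySem.Chars.lowerChar first_char = 'r') || decide (PySem.Chars.lowerChar first_char = 's')) then
        false
      else
        pvLoopA (PySem.List.slice string.toList (some 1) none)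

-- ===== PORT B =====
-- the DFA transition of Source B's loop body
def pvStepB (state : Int) (ch : Char) : Int :=
  if state = 0 then (if PySem.Chars.isIn [ch] ("rRsS".toList) then 1 else -1)
  else if 1 ≤ state ∧ state ≤ 7 ∧ ('0' ≤ ch ∧ ch ≤ '9') then state + 1
  else -1

def is_student_id_alt (string : String) : Bool :=
  decide (string.toList.foldl pvStepB 0 = 8)

-- ===== PRECONDITION & SPEC =====
def Spec_is_student_id (string : String) (out : Bool) : Prop := out = is_student_id_alt string
instance (string : String) (out : Bool) : Decidable (Spec_is_student_id string out) := by unfold Spec_is_student_id; infer_instance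

-- ===== CLAIM (what is proved, stated in full; the proofs are below) =====
def Claim_equal_is_student_id : Prop := ∀ (string : String), Dom_is_student_id string → Spec_is_student_id string (is_student_id string)

-- ===== LEMMAS AND PROOFS =====

theorem pv_char_eq_iff (a b : Char) : a = b ↔ a.toNat = b.toNat :=
  ⟨fun h => h ▸ rfl, fun h => Char.ext (UInt32.toNat_inj.mp h)⟩

theorem pv_lower_iff (c : Char) :
    (PySem.Chars.lowerChar c = 'r' ∨ PySem.Chars.lowerChar c = 's') ↔
      (c = 'r' ∨ c = 'R' ∨ c = 's' ∨ c = 'S') := by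
  unfold PySem.Chars.lowerChar PySem.Chars.isupper
  by_cases hu : ('A' ≤ c ∧ c ≤ 'Z')
  · have h1 : 65 ≤ c.toNat := hu.1
    have h2 : c.toNat ≤ 90 := hu.2
    have hv : (c.toNat + 32).isValidChar := by left; omega
    have hc : (decide ('A' ≤ c) && decide (c ≤ 'Z')) = true := by simp [hu.1, hu.2]
    rw [if_pos hc]
    have hval : (Char.ofNat (c.toNat + 32)).toNat = c.toNat + 32 := by
      rw [Char.toNat_ofNat, if_pos hv]
    simp only [pv_char_eq_iff, hval, show ('r').toNat = 114 from rfl,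
      show ('R').toNat = 82 from rfl, show ('s').toNat = 115 from rfl,
      show ('S').toNat = 83 from rfl]
    omega
  · have hc : (decide ('A' ≤ c) && decide (c ≤ 'Z')) = false := by
      simp only [Bool.and_eq_false_iff, decide_eq_false_iff_not]
      by_cases h : 'A' ≤ c
      · exact Or.inr fun h2 => hu ⟨h, h2⟩
      · exact Or.inl h
    rw [if_neg (by simp [hc])]
    have hA : ¬(65 ≤ c.toNat ∧ c.toNat ≤ 90) := fun ⟨a, b⟩ => hu ⟨a, b⟩
    simp only [pv_char_eq_iff, show ('r').toNat = 114 from rfl,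
      show ('R').toNat = 82 from rfl, show ('s').toNat = 115 from rfl,
      show ('S').toNat = 83 from rfl]
    omega

theorem pv_loopA_eq_all (xs : List Char) : pvLoopA xs = xs.all pvIsDigitA := by
  induction xs with
  | nil => rfl
  | cons c rest ih =>
    cases h : pvIsDigitA c with
    | false => simp [pvLoopA, h, List.all_cons]
    | true => simp [pvLoopA, h, List.all_cons, ih]

theorem pv_isIn_singleton (c : Char) (s : List Char) :
    PySem.Chars.isIn [c] s = true ↔ c ∈ s := by
  rw [PySem.Chars.isIn_iff_infix]; exact List.singleton_infix_iff c s

-- the dead state is absorbing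
theorem pv_foldB_dead (xs : List Char) : xs.foldl pvStepB (-1) = -1 := by
  induction xs with
  | nil => rfl
  | cons c rest ih =>
    have : pvStepB (-1) c = -1 := by
      unfold pvStepB
      rw [if_neg (by omega), if_neg (by omega)]
    simpa [List.foldl_cons, this] using ih

-- from a live post-letter state k ≥ 1, acceptance means: all digits and exactly 8 chars consumed
theorem pv_foldB_run (xs : List Char) (k : Int) (hk : 1 ≤ k) :
    xs.foldl pvStepB k = 8 ↔ (xs.all pvIsDigitA = true ∧ k + xs.length = 8) := by
  induction xs generalizing k with
  | nil => simp
  | cons c rest ih =>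
    rw [List.foldl_cons]
    by_cases hc : (1 ≤ k ∧ k ≤ 7 ∧ ('0' ≤ c ∧ c ≤ '9'))
    · have hstep : pvStepB k c = k + 1 := by
        unfold pvStepB; rw [if_neg (by omega), if_pos hc]
      rw [hstep, ih (k + 1) (by omega)]
      have hdig : pvIsDigitA c = true := by
        simp [pvIsDigitA, hc.2.2.1, hc.2.2.2]
      simp [List.all_cons, hdig]
      omega
    · have hstep : pvStepB k c = -1 := by
        unfold pvStepB; rw [if_neg (by omega), if_neg hc]
      rw [hstep, pv_foldB_dead]
      constructor
      · intro h; omega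
      · rintro ⟨hall, hlen⟩
        exfalso
        simp [List.all_cons, pvIsDigitA] at hall
        rcases hall with ⟨⟨h1, h2⟩, -⟩
        have : rest.length + 1 = (c :: rest).length := by simp
        apply hc
        refine ⟨hk, ?_, h1, h2⟩
        simp at hlen
        omega

-- ===== VERDICT (by name: the statement is the Claim_ definition above) =====
theorem is_student_id_spec : Claim_equal_is_student_id := by
  intro s _
  unfold Spec_is_student_id is_student_id is_student_id_alt
  cases hs : s.toList with
  | nil =>
    have hl : PySem.Str.len s = 0 := by
      rw [PySem.Str.len_eq, hs]; rfl
    rw [if_pos (by rw [hl]; decide)]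
    decide
  | cons c rest =>
    have hget : PySem.Str.pyGet? s 0 = some c := by
      rw [show (0 : Int) = ((0 : Nat) : Int) from rfl, PySem.Str.pyGet?_natCast]
      simp [hs]
    have hlen : PySem.Str.len s = (rest.length : Int) + 1 := by
      rw [PySem.Str.len_eq, hs]; simp
    have hslice : PySem.List.slice (c :: rest) (some 1) none = rest := by
      rw [PySem.List.slice_from_one]; rfl
    rw [List.foldl_cons]
    by_cases hin : PySem.Chars.isIn [c] ("rRsS".toList) = true
    · -- live first step: state becomes 1
      have hstep : pvStepB 0 c = 1 := by unfold pvStepB; rw [if_pos rfl, if_pos hin]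
      rw [hstep]
      have hlow : (PySem.Chars.lowerChar c = 'r' ∨ PySem.Chars.lowerChar c = 's') := by
        apply (pv_lower_iff c).mpr
        have := (pv_isIn_singleton c _).mp hin
        simpa [show "rRsS".toList = ['r','R','s','S'] from rfl] using this
      by_cases hl8 : PySem.Str.len s = 8
      · rw [if_neg (fun h => h hl8)]
        rw [hget]
        dsimp only
        have hcond : (!(decide (PySem.Chars.lowerChar c = 'r') || decide (PySem.Chars.lowerChar c = 's'))) = false := by
          rcases hlow with h | h <;> simp [h]
        rw [hcond]
        simp only [Bool.false_eq_true, if_false]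
        rw [hslice, pv_loopA_eq_all]
        have hr7 : (rest.length : Int) = 7 := by rw [hlen] at hl8; omega
        rcases Bool.eq_false_or_eq_true (rest.all pvIsDigitA) with hall | hall
        · rw [hall]
          symm
          rw [decide_eq_true_eq, pv_foldB_run rest 1 (by omega)]
          exact ⟨hall, by omega⟩
        · rw [hall]
          symm
          rw [decide_eq_false_iff_not, pv_foldB_run rest 1 (by omega)]
          rintro ⟨h1, -⟩; rw [hall] at h1; exact absurd h1 (by simp)
      · rw [if_pos hl8]
        symm
        simp only [decide_eq_false_iff_not]
        rw [pv_foldB_run rest 1 (by omega)]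
        rintro ⟨-, h2⟩
        apply hl8
        rw [hlen]; omega
    · -- first char rejected: dead state
      have hstep : pvStepB 0 c = -1 := by
        unfold pvStepB
        rw [if_pos rfl, if_neg (by simpa using hin)]
      rw [hstep, pv_foldB_dead]
      have hB : decide ((-1 : Int) = 8) = false := by decide
      rw [hB]
      by_cases hl8 : PySem.Str.len s = 8
      · rw [if_neg (fun h => h hl8), hget]
        dsimp only
        have hnlow : ¬(PySem.Chars.lowerChar c = 'r' ∨ PySem.Chars.lowerChar c = 's') := by
          intro h
          have hmem := (pv_lower_iff c).mp h
          apply hin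
          apply (pv_isIn_singleton c _).mpr
          simp only [show "rRsS".toList = ['r','R','s','S'] from rfl, List.mem_cons]
          tauto
        rw [not_or] at hnlow
        simp [hnlow.1, hnlow.2]
      · rw [if_pos hl8]
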